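-- pv_equiv track=rewrite | github.com/DragunWF/Competitive-Programming | CodeWars/python/7_kyu/squad_number_generator.py | generate_number
-- ===== SOURCE A (Python) =====
-- def generate_number(squad: list[int], n: int) -> int | None:
--     if not n in squad:
--         return n
--
--     MIN_RANGE, MAX_RANGE = 1, 9
--     possible_combinations = []
--     for firstDigit in range(MIN_RANGE, MAX_RANGE + 1):
--         for secondDigit in range(MIN_RANGE, MAX_RANGE + 1):
--             total = firstDigit + secondDigit
--             combined_digits = f"{firstDigit}{secondDigit}"
--             if not int(combined_digits) in squad and total == n:
--                 possible_combinations.append(int(combined_digits))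
--     return min(possible_combinations) if possible_combinations else None
-- ===== SOURCE B (Python) =====
-- def generate_number(squad: list[int], n: int) -> int | None:
--     if n not in squad:
--         return n
--     # candidates with digit-sum n are 10*f + (n-f) = 9*f + n, increasing in f,
--     # so the first non-squad one found scanning f upward is the minimum
--     for first in range(max(1, n - 9), min(9, n - 1) + 1):
--         num = 9 * first + n
--         if num not in squad:
--             return num
--     return None
-- ===== Notes on version B (the rewrite author's own statement) =====
-- stated objective: simpler
-- what changed: Replaced the 9x9 nested loop that builds all digit-sum-n candidates via string concatenation and then takes min with a single arithmetic scan over the first digit from max(1,n-9) to min(9,n-1), returning the first non-squad candidate 9*first+n (candidates are increasing in first, so the first hit is the minimum).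
import Mathlib
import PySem

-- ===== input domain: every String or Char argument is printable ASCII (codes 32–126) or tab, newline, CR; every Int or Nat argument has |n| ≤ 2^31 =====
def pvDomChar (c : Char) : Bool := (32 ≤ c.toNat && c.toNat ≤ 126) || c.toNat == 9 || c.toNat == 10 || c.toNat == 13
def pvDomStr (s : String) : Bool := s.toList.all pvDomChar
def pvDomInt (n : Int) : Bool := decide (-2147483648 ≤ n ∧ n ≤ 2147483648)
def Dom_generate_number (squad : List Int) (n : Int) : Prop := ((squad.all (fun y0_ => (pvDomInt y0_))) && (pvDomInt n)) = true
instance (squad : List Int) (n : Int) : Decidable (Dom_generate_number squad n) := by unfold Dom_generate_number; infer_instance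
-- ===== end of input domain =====

-- B replaces A's 9x9 nested loop (string-built candidates, collect, min) by a single
-- arithmetic scan over the first digit that returns the first non-squad candidate (simpler).


-- ===== PORT A =====
def generate_number (squad : List Int) (n : Int) : Option Int :=
  if ¬ n ∈ squad then some n
  else
    -- MIN_RANGE, MAX_RANGE = 1, 9
    let possible_combinations : List Int :=
      (PySem.List.pyRange 1 (9 + 1) 1).foldl (fun acc firstDigit =>
        (PySem.List.pyRange 1 (9 + 1) 1).foldl (fun acc secondDigit =>
          let total := firstDigit + secondDigit
          let combined_digits := PySem.Int.toChars firstDigit ++ PySem.Int.toChars secondDigit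
          -- int(combined_digits): always succeeds here (two decimal digits), so getD 0 is exact
          let v := (PySem.Int.ofChars? combined_digits).getD 0
          if ¬ v ∈ squad ∧ total = n then acc ++ [v] else acc) acc) []
    if possible_combinations ≠ [] then PySem.List.min? possible_combinations (fun x => x) else none

-- ===== PORT B =====
def generate_number_alt (squad : List Int) (n : Int) : Option Int :=
  if ¬ n ∈ squad then some n
  else
    -- for first in range(max(1, n-9), min(9, n-1)+1): early return via findSome?
    (PySem.List.pyRange (max 1 (n - 9)) (min 9 (n - 1) + 1) 1).findSome? (fun first =>
      let num := 9 * first + n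
      if ¬ num ∈ squad then some num else none)

-- ===== PRECONDITION & SPEC =====
def Spec_generate_number (squad : List Int) (n : Int) (out : Option Int) : Prop := out = generate_number_alt squad n
instance (squad : List Int) (n : Int) (out : Option Int) : Decidable (Spec_generate_number squad n out) := by unfold Spec_generate_number; infer_instance

-- ===== CLAIM (what is proved, stated in full; the proofs are below) =====
def Claim_equal_generate_number : Prop := ∀ (squad : List Int) (n : Int), Dom_generate_number squad n → Spec_generate_number squad n (generate_number squad n)

-- ===== LEMMAS AND PROOFS =====

-- the candidate bag contributed by a first digit f
def pvE (squad : List Int) (n f : Int) : List Int :=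
  if 1 ≤ n - f ∧ n - f ≤ 9 ∧ ¬ (9 * f + n) ∈ squad then [9 * f + n] else []

def pvE' (squad : List Int) (n f : Int) : List Int :=
  if ¬ (9 * f + n) ∈ squad then [9 * f + n] else []

-- string-built two-digit number is 10*f + s on the digit range
lemma pv_digit_eval : ∀ f ∈ PySem.List.pyRange 1 (9+1) 1, ∀ s ∈ PySem.List.pyRange 1 (9+1) 1,
    (PySem.Int.ofChars? (PySem.Int.toChars f ++ PySem.Int.toChars s)).getD 0 = 10 * f + s := by decide

-- a fold that appends at most once: only s = n - f can fire
lemma pv_foldl_single (squad : List Int) (t : Int) (g : Int → Int) :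
    ∀ (ss : List Int), ss.Nodup → ∀ (acc : List Int),
    ss.foldl (fun acc s => if ¬ g s ∈ squad ∧ s = t then acc ++ [g s] else acc) acc
      = acc ++ (if t ∈ ss ∧ ¬ g t ∈ squad then [g t] else []) := by
  intro ss
  induction ss with
  | nil => intro _ acc; simp
  | cons s ss ih =>
    intro hnd acc
    rw [List.nodup_cons] at hnd
    obtain ⟨hs, hnd⟩ := hnd
    simp only [List.foldl_cons]
    by_cases hst : s = t
    · subst hst
      by_cases hP : ¬ g s ∈ squad
      · rw [if_pos ⟨hP, rfl⟩, ih hnd]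
        simp [hs, hP]
      · rw [if_neg (by tauto), ih hnd]
        simp [hs, hP]
    · rw [if_neg (by tauto), ih hnd]
      simp [List.mem_cons, Ne.symm hst]

lemma pv_inner (squad : List Int) (n f : Int) (acc : List Int) :
    (PySem.List.pyRange 1 (9+1) 1).foldl (fun acc s =>
        if ¬ (10 * f + s) ∈ squad ∧ f + s = n then acc ++ [10 * f + s] else acc) acc
      = acc ++ pvE squad n f := by
  have hcond : ∀ (acc : List Int) (s : Int), s ∈ PySem.List.pyRange 1 (9+1) 1 →
      (if ¬ (10 * f + s) ∈ squad ∧ f + s = n then acc ++ [10 * f + s] else acc)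
        = (if ¬ (10 * f + s) ∈ squad ∧ s = n - f then acc ++ [10 * f + s] else acc) := by
    intro acc s _
    have : (f + s = n) ↔ (s = n - f) := by omega
    simp only [this]
  refine Eq.trans (PySem.List.foldl_congr_mem _ _
      (fun acc s => if ¬ (10 * f + s) ∈ squad ∧ s = n - f then acc ++ [10 * f + s] else acc) _ hcond)
    (Eq.trans (pv_foldl_single squad (n - f) (fun s => 10 * f + s) _ (PySem.List.nodup_pyRange_one _ _) acc) ?_)
  have h10 : 10 * f + (n - f) = 9 * f + n := by ring
  simp only [h10, pvE, PySem.List.mem_pyRange_one]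
  congr 1
  by_cases h1 : 1 ≤ n - f ∧ n - f ≤ 9 ∧ ¬ (9 * f + n) ∈ squad
  · rw [if_pos ⟨⟨h1.1, by omega⟩, h1.2.2⟩, if_pos h1]
  · rw [if_neg (fun hc => h1 ⟨hc.1.1, by omega, hc.2⟩), if_neg h1]

-- findSome? as head of the flatMap of option contents
lemma pv_findSome?_eq_head? {α β : Type} (h : α → Option β) :
    ∀ (xs : List α), xs.findSome? h = (xs.flatMap fun x => (h x).toList).head? := by
  intro xs
  induction xs with
  | nil => simp
  | cons x xs ih =>
    rw [List.findSome?_cons]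
    cases hx : h x <;> simp [hx, ih]

lemma pv_mem_pvE' (squad : List Int) (n f x : Int) (hx : x ∈ pvE' squad n f) : x = 9 * f + n := by
  unfold pvE' at hx
  split at hx <;> simp_all

lemma pv_pairwise (squad : List Int) (n : Int) :
    ∀ (xs : List Int), xs.Pairwise (· < ·) → ((xs.flatMap (pvE' squad n)).Pairwise (· < ·)) := by
  intro xs
  induction xs with
  | nil => simp
  | cons f xs ih =>
    intro hp
    rw [List.pairwise_cons] at hp
    rw [List.flatMap_cons, List.pairwise_append]
    refine ⟨?_, ih hp.2, ?_⟩
    · unfold pvE'; split <;> simp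
    · intro a ha b hb
      rw [List.mem_flatMap] at hb
      obtain ⟨g, hg, hbg⟩ := hb
      rw [pv_mem_pvE' squad n f a ha, pv_mem_pvE' squad n g b hbg]
      have := hp.1 g hg
      omega

lemma pv_foldl_min_self (x : Int) : ∀ (t : List Int), (∀ y ∈ t, x ≤ y) → t.foldl min x = x := by
  intro t
  induction t generalizing x with
  | nil => intro _; rfl
  | cons y t ih =>
    intro h
    have hxy : min x y = x := min_eq_left (h y (by simp))
    simp only [List.foldl_cons, hxy]
    exact ih x (fun z hz => h z (by simp [hz]))

lemma pv_min_of_pairwise (xs : List Int) (hp : xs.Pairwise (· < ·)) :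
    (if xs ≠ [] then PySem.List.min? xs (fun x => x) else none) = xs.head? := by
  cases xs with
  | nil => simp
  | cons x t =>
    rw [List.pairwise_cons] at hp
    simp only [ne_eq, reduceCtorEq, not_false_eq_true, if_pos, List.head?_cons]
    rw [PySem.List.min?_id_cons, pv_foldl_min_self x t (fun y hy => le_of_lt (hp.1 y hy))]

-- the two flatMaps agree
lemma pv_ranges (squad : List Int) (n : Int) :
    (PySem.List.pyRange 1 (9+1) 1).flatMap (pvE squad n)
      = (PySem.List.pyRange (max 1 (n - 9)) (min 9 (n - 1) + 1) 1).flatMap (pvE' squad n) := by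
  by_cases hb : 2 ≤ n ∧ n ≤ 18
  · have h1 : (1 : Int) ≤ max 1 (n - 9) := by omega
    have h2 : max 1 (n - 9) ≤ min 9 (n - 1) + 1 := by omega
    have h3 : min 9 (n - 1) + 1 ≤ (9 + 1 : Int) := by omega
    rw [PySem.List.pyRange_one_append 1 (max 1 (n - 9)) (9+1) h1 (by omega),
        PySem.List.pyRange_one_append (max 1 (n - 9)) (min 9 (n - 1) + 1) (9+1) h2 h3]
    rw [List.flatMap_append, List.flatMap_append]
    have hpre : (PySem.List.pyRange 1 (max 1 (n - 9)) 1).flatMap (pvE squad n) = [] := by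
      rw [List.flatMap_eq_nil_iff]
      intro f hf
      rw [PySem.List.mem_pyRange_one] at hf
      unfold pvE
      rw [if_neg (by omega)]
    have hpost : (PySem.List.pyRange (min 9 (n - 1) + 1) (9+1) 1).flatMap (pvE squad n) = [] := by
      rw [List.flatMap_eq_nil_iff]
      intro f hf
      rw [PySem.List.mem_pyRange_one] at hf
      unfold pvE
      rw [if_neg (by omega)]
    have hmid : (PySem.List.pyRange (max 1 (n - 9)) (min 9 (n - 1) + 1) 1).flatMap (pvE squad n)
        = (PySem.List.pyRange (max 1 (n - 9)) (min 9 (n - 1) + 1) 1).flatMap (pvE' squad n) := by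
      apply List.flatMap_congr
      intro f hf
      rw [PySem.List.mem_pyRange_one] at hf
      unfold pvE pvE'
      by_cases hP : ¬ (9 * f + n) ∈ squad
      · rw [if_pos ⟨by omega, by omega, hP⟩, if_pos hP]
      · rw [if_neg (by tauto), if_neg hP]
    rw [hpre, hpost, hmid]
    simp
  · have hA : (PySem.List.pyRange 1 (9+1) 1).flatMap (pvE squad n) = [] := by
      rw [List.flatMap_eq_nil_iff]
      intro f hf
      rw [PySem.List.mem_pyRange_one] at hf
      unfold pvE
      rw [if_neg (by omega)]
    have hB : PySem.List.pyRange (max 1 (n - 9)) (min 9 (n - 1) + 1) 1 = [] :=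
      PySem.List.pyRange_one_eq_nil (by omega)
    rw [hA, hB]
    rfl

-- ===== VERDICT (by name: the statement is the Claim_ definition above) =====
theorem generate_number_spec : Claim_equal_generate_number := by
  intro squad n _
  unfold Spec_generate_number generate_number generate_number_alt
  by_cases hin : ¬ n ∈ squad
  · rw [if_pos hin, if_pos hin]
  · rw [if_neg hin, if_neg hin]
    have houter : (PySem.List.pyRange 1 (9+1) 1).foldl (fun acc firstDigit =>
        (PySem.List.pyRange 1 (9+1) 1).foldl (fun acc secondDigit =>
          let total := firstDigit + secondDigit
          let combined_digits := PySem.Int.toChars firstDigit ++ PySem.Int.toChars secondDigit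
          let v := (PySem.Int.ofChars? combined_digits).getD 0
          if ¬ v ∈ squad ∧ total = n then acc ++ [v] else acc) acc) []
        = (PySem.List.pyRange 1 (9+1) 1).flatMap (pvE squad n) := by
      have hstep : ∀ (acc : List Int) (f : Int), f ∈ PySem.List.pyRange 1 (9+1) 1 →
          (PySem.List.pyRange 1 (9+1) 1).foldl (fun acc s =>
            let total := f + s
            let combined_digits := PySem.Int.toChars f ++ PySem.Int.toChars s
            let v := (PySem.Int.ofChars? combined_digits).getD 0
            if ¬ v ∈ squad ∧ total = n then acc ++ [v] else acc) acc
          = acc ++ pvE squad n f := by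
        intro acc f hf
        refine Eq.trans (PySem.List.foldl_congr_mem _ _
            (fun acc s => if ¬ (10 * f + s) ∈ squad ∧ f + s = n then acc ++ [10 * f + s] else acc) _
            (fun acc s hs => by dsimp only; rw [pv_digit_eval f hf s hs])) ?_
        exact pv_inner squad n f acc
      refine Eq.trans (PySem.List.foldl_congr_mem _ _
          (fun acc f => acc ++ pvE squad n f) _ hstep) ?_
      rw [PySem.List.foldl_append_eq_flatMap (g := pvE squad n), List.nil_append]
    simp only [houter, pv_ranges squad n]
    rw [pv_min_of_pairwise _ (pv_pairwise squad n _ (PySem.List.pairwise_lt_pyRange_one _ _)),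
        pv_findSome?_eq_head?]
    congr 1
    apply List.flatMap_congr
    intro f _
    simp only [pvE']
    by_cases hP : ¬ (9 * f + n) ∈ squad
    · rw [if_pos hP]; simp [hP]
    · rw [if_neg hP]; simp at hP; simp [hP]
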